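-- pv_equiv track=rewrite | github.com/ishangote/Coding-Interviews-Python | Leetcode/2222 Number of Ways to Select Buildings/ways_to_select_buildings.py | ways_to_select_buildings
-- ===== SOURCE A (Python) =====
-- def helper(input_string, direction, bit):
--     res = [0] * len(input_string)
--     count = 0
--
--     start, end, step = (
--         (0, len(input_string), 1)
--         if direction == "LEFT"
--         else (len(input_string) - 1, -1, -1)
--     )
--
--     for idx in range(start, end, step):
--         if input_string[idx] == bit:
--             count += 1
--         else:
--             res[idx] = count
--
--     return res
--
-- def ways_to_select_buildings(input_string):
--     left_zeroes = helper(input_string, "LEFT", "0")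
--     right_zeroes = helper(input_string, "RIGHT", "0")
--     left_ones = helper(input_string, "LEFT", "1")
--     right_ones = helper(input_string, "RIGHT", "1")
--
--     res = 0
--
--     for idx, bit in enumerate(input_string):
--         if bit == "0":
--             res += left_ones[idx] * right_ones[idx]
--         else:
--             res += left_zeroes[idx] * right_zeroes[idx]
--
--     return res
-- ===== SOURCE B (Python) =====
-- def ways_to_select_buildings(input_string):
--     # One forward pass with six running counts; O(n) time, O(1) extra space.
--     c0 = c1 = p0n = p10 = t010 = t101 = 0
--     for c in input_string:
--         if c == "0":
--             t010 += p0n      # a '0' closes every (zero, non-zero) pair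
--             p10 += c1        # '1' then this '0'
--             c0 += 1
--         else:
--             p0n += c0        # '0' then this non-zero char
--             if c == "1":
--                 t101 += p10  # a '1' closes every ('1','0') pair
--                 c1 += 1
--     return t010 + t101
-- ===== Notes on version B (the rewrite author's own statement) =====
-- stated objective: faster
-- what changed: Replaced the four prefix/suffix count arrays plus a final indexed pass with a single forward pass maintaining six running scalars (zero/one counts, open pair counts, closed triple counts), eliminating all intermediate arrays and indexing.
import Mathlib
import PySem

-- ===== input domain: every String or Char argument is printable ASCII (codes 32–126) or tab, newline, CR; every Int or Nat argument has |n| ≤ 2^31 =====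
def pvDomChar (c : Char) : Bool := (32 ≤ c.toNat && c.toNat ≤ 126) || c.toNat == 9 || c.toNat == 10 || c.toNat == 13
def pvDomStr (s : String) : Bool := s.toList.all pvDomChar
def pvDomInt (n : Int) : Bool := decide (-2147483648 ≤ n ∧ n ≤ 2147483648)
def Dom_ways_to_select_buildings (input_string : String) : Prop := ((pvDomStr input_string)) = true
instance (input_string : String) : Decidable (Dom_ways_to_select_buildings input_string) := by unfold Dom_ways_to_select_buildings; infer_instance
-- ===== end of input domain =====

-- B replaces A's four prefix/suffix count arrays and final indexed pass by one forward
-- pass over the characters keeping six running integer counts (no arrays).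

-- ===== PORT A =====

-- the loop body of `helper` (closes over the character list and the bit), named so it can be reasoned about
def pvHelperStep (s : List Char) (bit : Char) (st : List Int × Int) (idx : Int) : List Int × Int :=
  -- idx is always a valid index of s (it comes from range(0,n) or range(n-1,-1,-1)),
  -- so the `.getD ' '` and `.toNat` defaults below are never actually used
  if (PySem.List.pyGet? s idx).getD ' ' == bit then (st.1, st.2 + 1)
  else (st.1.set idx.toNat st.2, st.2)

def pvHelper (input_string : String) (direction : String) (bit : Char) : List Int :=
  let s := input_string.toList
  let res0 : List Int := List.replicate s.length 0
  let sse : Int × Int × Int :=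
    if direction == "LEFT" then ((0 : Int), (s.length : Int), 1)
    else ((s.length : Int) - 1, -1, -1)
  let st := (PySem.List.pyRange sse.1 sse.2.1 sse.2.2).foldl (pvHelperStep s bit) (res0, 0)
  st.1

-- the body of A's final loop over enumerate(input_string), named
def pvMainStep (lz rz lo ro : List Int) (res : Int) (p : Int × Char) : Int :=
  if p.2 == '0' then
    res + (PySem.List.pyGet? lo p.1).getD 0 * (PySem.List.pyGet? ro p.1).getD 0
  else
    res + (PySem.List.pyGet? lz p.1).getD 0 * (PySem.List.pyGet? rz p.1).getD 0

def ways_to_select_buildings (input_string : String) : Int :=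
  let left_zeroes := pvHelper input_string "LEFT" '0'
  let right_zeroes := pvHelper input_string "RIGHT" '0'
  let left_ones := pvHelper input_string "LEFT" '1'
  let right_ones := pvHelper input_string "RIGHT" '1'
  (PySem.List.enumerate input_string.toList).foldl
    (pvMainStep left_zeroes right_zeroes left_ones right_ones) 0

-- ===== PORT B =====

-- one step of B's single pass: state (c0, c1, p0n, p10, t010, t101)
def pvAltStep (st : Int × Int × Int × Int × Int × Int) (c : Char) : Int × Int × Int × Int × Int × Int :=
  let (c0, c1, p0n, p10, t010, t101) := st
  if c == '0' then (c0 + 1, c1, p0n, p10 + c1, t010 + p0n, t101)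
  else if c == '1' then (c0, c1 + 1, p0n + c0, p10, t010, t101 + p10)
  else (c0, c1, p0n + c0, p10, t010, t101)

def ways_to_select_buildings_alt (input_string : String) : Int :=
  let st := input_string.toList.foldl pvAltStep (0, 0, 0, 0, 0, 0)
  st.2.2.2.2.1 + st.2.2.2.2.2

-- ===== PRECONDITION & SPEC =====
def Spec_ways_to_select_buildings (input_string : String) (out : Int) : Prop := out = ways_to_select_buildings_alt input_string
instance (input_string : String) (out : Int) : Decidable (Spec_ways_to_select_buildings input_string out) := by unfold Spec_ways_to_select_buildings; infer_instance

-- ===== CLAIM (what is proved, stated in full; the proofs are below) =====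
def Claim_equal_ways_to_select_buildings : Prop := ∀ (input_string : String), Dom_ways_to_select_buildings input_string → Spec_ways_to_select_buildings input_string (ways_to_select_buildings input_string)

-- ===== LEMMAS AND PROOFS =====

-- number of occurrences of `bit`
def cntb (bit : Char) : List Char → Int
  | [] => 0
  | c :: t => (if c = bit then 1 else 0) + cntb bit t

-- number of characters ≠ '0'
def cntn : List Char → Int
  | [] => 0
  | c :: t => (if c = '0' then 0 else 1) + cntn t

-- pairs (i < j) with s[i] = '0', s[j] ≠ '0'
def pr0n : List Char → Int
  | [] => 0
  | c :: t => (if c = '0' then cntn t else 0) + pr0n t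

-- pairs (i < j) with s[i] = '1', s[j] = '0'
def pr10 : List Char → Int
  | [] => 0
  | c :: t => (if c = '1' then cntb '0' t else 0) + pr10 t

-- pairs (i < j) with s[i] ≠ '0', s[j] = '0'
def prn0 : List Char → Int
  | [] => 0
  | c :: t => (if c = '0' then 0 else cntb '0' t) + prn0 t

-- pairs (i < j) with s[i] = '0', s[j] = '1'
def pr01 : List Char → Int
  | [] => 0
  | c :: t => (if c = '0' then cntb '1' t else 0) + pr01 t

-- triples (i < j < k) with s[i] = '0', s[j] ≠ '0', s[k] = '0'
def tr010 : List Char → Int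
  | [] => 0
  | c :: t => (if c = '0' then prn0 t else 0) + tr010 t

-- triples (i < j < k) with s[i] = '1', s[j] = '0', s[k] = '1'
def tr101 : List Char → Int
  | [] => 0
  | c :: t => (if c = '1' then pr01 t else 0) + tr101 t

-- A's final sum, recursively with the prefix '0'/'1' counts as parameters
def sumSpec (p0 p1 : Int) : List Char → Int
  | [] => 0
  | c :: t =>
      (if c = '0' then p1 * cntb '1' t else p0 * cntb '0' t)
      + sumSpec (p0 + if c = '0' then 1 else 0) (p1 + if c = '1' then 1 else 0) t

lemma cntb_append (bit : Char) (xs ys : List Char) :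
    cntb bit (xs ++ ys) = cntb bit xs + cntb bit ys := by
  induction xs with
  | nil => simp [cntb]
  | cons c t ih => simp [cntb, ih]; ring

-- B's fold, from an arbitrary state
lemma altFold (l : List Char) : ∀ c0 c1 p0n p10 t0 t1 : Int,
    l.foldl pvAltStep (c0, c1, p0n, p10, t0, t1) =
      (c0 + cntb '0' l, c1 + cntb '1' l, p0n + c0 * cntn l + pr0n l,
       p10 + c1 * cntb '0' l + pr10 l,
       t0 + p0n * cntb '0' l + c0 * prn0 l + tr010 l,
       t1 + p10 * cntb '1' l + c1 * pr01 l + tr101 l) := by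
  induction l with
  | nil => intro c0 c1 p0n p10 t0 t1; simp [cntb, cntn, pr0n, pr10, prn0, pr01, tr010, tr101]
  | cons c t ih =>
      intro c0 c1 p0n p10 t0 t1
      simp only [List.foldl_cons]
      by_cases h0 : c = '0'
      · subst h0
        rw [show pvAltStep (c0, c1, p0n, p10, t0, t1) '0'
              = (c0 + 1, c1, p0n, p10 + c1, t0 + p0n, t1) from by simp [pvAltStep]]
        rw [ih]
        simp only [cntb, cntn, pr0n, pr10, prn0, pr01, tr010, tr101]
        simp [Prod.ext_iff]
        and_intros <;> ring
      · by_cases h1 : c = '1'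
        · subst h1
          rw [show pvAltStep (c0, c1, p0n, p10, t0, t1) '1'
                = (c0, c1 + 1, p0n + c0, p10, t0, t1 + p10) from by simp [pvAltStep]]
          rw [ih]
          simp only [cntb, cntn, pr0n, pr10, prn0, pr01, tr010, tr101]
          simp [Prod.ext_iff]
          and_intros <;> ring
        · rw [show pvAltStep (c0, c1, p0n, p10, t0, t1) c
                = (c0, c1, p0n + c0, p10, t0, t1) from by simp [pvAltStep, h0, h1]]
          rw [ih]
          simp only [cntb, cntn, pr0n, pr10, prn0, pr01, tr010, tr101]
          simp [Prod.ext_iff, h0, h1]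
          and_intros <;> ring

lemma sumSpec_eq (l : List Char) : ∀ p0 p1 : Int,
    sumSpec p0 p1 l = p0 * prn0 l + p1 * pr01 l + tr010 l + tr101 l := by
  induction l with
  | nil => intro p0 p1; simp [sumSpec, prn0, pr01, tr010, tr101]
  | cons c t ih =>
      intro p0 p1
      by_cases h0 : c = '0'
      · subst h0
        simp only [sumSpec, ih, prn0, pr01, tr010, tr101]
        simp
        ring
      · by_cases h1 : c = '1'
        · subst h1
          simp only [sumSpec, ih, prn0, pr01, tr010, tr101]
          simp
          ring
        · simp only [sumSpec, ih, prn0, pr01, tr010, tr101]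
          simp [h0, h1]
          ring

lemma getD_set_ne {xs : List Int} {i j : Nat} {v : Int} (h : i ≠ j) :
    (xs.set i v).getD j 0 = xs.getD j 0 := by
  simp [List.getD, List.getElem?_set_ne h]

lemma getD_set_self {xs : List Int} {i : Nat} {v : Int} (h : i < xs.length) :
    (xs.set i v).getD i 0 = v := by
  simp [List.getD, h]

-- the LEFT helper fold, characterised elementwise
lemma helperL (bit : Char) (l : List Char) : ∀ (k i : Nat), l.length - i = k →
    ∀ res : List Int, res.length = l.length →
    (∀ j : Nat, i ≤ j → j < l.length → res.getD j 0 = 0) →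
    ((PySem.List.pyRange (i : Int) (l.length : Int) 1).foldl (pvHelperStep l bit)
        (res, cntb bit (l.take i))).1.length = l.length ∧
    (∀ j : Nat, j < l.length →
      ((PySem.List.pyRange (i : Int) (l.length : Int) 1).foldl (pvHelperStep l bit)
          (res, cntb bit (l.take i))).1.getD j 0 =
        if j < i then res.getD j 0
        else if l.getD j ' ' = bit then 0 else cntb bit (l.take j)) := by
  intro k
  induction k with
  | zero =>
      intro i hk res hlen hzero
      rw [PySem.List.pyRange_one_eq_nil (by exact_mod_cast Nat.le_of_sub_eq_zero hk)]
      refine ⟨hlen, fun j hj => ?_⟩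
      rw [if_pos (by omega)]
      rfl
  | succ k ihk =>
      intro i hk res hlen hzero
      have hi : i < l.length := by omega
      rw [PySem.List.pyRange_one_cons (by exact_mod_cast hi), List.foldl_cons]
      have hgetD : l.getD i ' ' = l[i] := List.getD_eq_getElem l ' ' hi
      have hcast : (i : Int) + 1 = ((i + 1 : Nat) : Int) := by push_cast; ring
      by_cases hbit : l[i] = bit
      · rw [show pvHelperStep l bit (res, cntb bit (l.take i)) (i : Int)
              = (res, cntb bit (l.take i) + 1) from by
            simp [pvHelperStep, List.getElem?_eq_getElem hi, hbit]]
        rw [show cntb bit (l.take i) + 1 = cntb bit (l.take (i + 1)) from by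
          rw [List.take_add_one, cntb_append, List.getElem?_eq_getElem hi]
          simp [cntb, hbit]]
        rw [hcast]
        obtain ⟨hL, hP⟩ := ihk (i + 1) (by omega) res hlen
          (fun j hj hj2 => hzero j (by omega) hj2)
        refine ⟨hL, fun j hj => ?_⟩
        rw [hP j hj]
        rcases Nat.lt_trichotomy j i with hji | hji | hji
        · rw [if_pos (show j < i + 1 by omega), if_pos hji]
        · subst hji
          rw [if_pos (show j < j + 1 by omega), if_neg (show ¬ j < j by omega),
            hgetD, if_pos hbit]
          exact hzero j (by omega) hj
        · rw [if_neg (show ¬ j < i + 1 by omega), if_neg (show ¬ j < i by omega)]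
      · have heq : cntb bit (l.take i) = cntb bit (l.take (i + 1)) := by
          rw [List.take_add_one, cntb_append, List.getElem?_eq_getElem hi]
          simp [cntb, hbit]
        rw [show pvHelperStep l bit (res, cntb bit (l.take i)) (i : Int)
              = (res.set i (cntb bit (l.take i)), cntb bit (l.take i)) from by
            simp [pvHelperStep, List.getElem?_eq_getElem hi, hbit]]
        rw [heq, hcast]
        obtain ⟨hL, hP⟩ := ihk (i + 1) (by omega)
          (res.set i (cntb bit (l.take (i + 1))))
          (by simpa using hlen)
          (fun j hj hj2 => by
            rw [getD_set_ne (show i ≠ j by omega)]; exact hzero j (by omega) hj2)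
        refine ⟨hL, fun j hj => ?_⟩
        rw [hP j hj]
        rcases Nat.lt_trichotomy j i with hji | hji | hji
        · rw [if_pos (show j < i + 1 by omega), if_pos hji,
            getD_set_ne (show i ≠ j by omega)]
        · subst hji
          rw [if_pos (show j < j + 1 by omega), if_neg (show ¬ j < j by omega),
            hgetD, if_neg hbit, getD_set_self (hlen ▸ hi)]
          exact heq.symm
        · rw [if_neg (show ¬ j < i + 1 by omega), if_neg (show ¬ j < i by omega)]

-- the RIGHT helper fold, characterised elementwise
lemma helperR (bit : Char) (l : List Char) : ∀ (k : Nat) (i : Int), (i + 1).toNat = k →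
    -1 ≤ i → i < (l.length : Int) →
    ∀ res : List Int, res.length = l.length →
    (∀ j : Nat, (j : Int) ≤ i → res.getD j 0 = 0) →
    ((PySem.List.pyRange i (-1) (-1)).foldl (pvHelperStep l bit)
        (res, cntb bit (l.drop (i + 1).toNat))).1.length = l.length ∧
    (∀ j : Nat, j < l.length →
      ((PySem.List.pyRange i (-1) (-1)).foldl (pvHelperStep l bit)
          (res, cntb bit (l.drop (i + 1).toNat))).1.getD j 0 =
        if i < (j : Int) then res.getD j 0
        else if l.getD j ' ' = bit then 0 else cntb bit (l.drop (j + 1))) := by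
  intro k
  induction k with
  | zero =>
      intro i hk h1 h2 res hlen hzero
      have hi : i = -1 := by omega
      subst hi
      rw [PySem.List.pyRange_neg_one_eq_nil (by omega)]
      refine ⟨hlen, fun j hj => ?_⟩
      rw [if_pos (by omega)]
      rfl
  | succ k ihk =>
      intro i hk h1 h2 res hlen hzero
      have h0i : 0 ≤ i := by omega
      lift i to Nat using h0i with m
      have hm : m < l.length := by exact_mod_cast h2
      rw [PySem.List.pyRange_neg_one_cons (by omega), List.foldl_cons]
      have hgetD : l.getD m ' ' = l[m] := List.getD_eq_getElem l ' ' hm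
      have htn : ((m : Int) + 1).toNat = m + 1 := by omega
      have hdc : l.drop m = l[m] :: l.drop (m + 1) := List.drop_eq_getElem_cons hm
      have htn' : (((m : Int) - 1) + 1).toNat = m := by omega
      rw [htn]
      by_cases hbit : l[m] = bit
      · rw [show pvHelperStep l bit (res, cntb bit (l.drop (m + 1))) (m : Int)
              = (res, cntb bit (l.drop (m + 1)) + 1) from by
            simp [pvHelperStep, List.getElem?_eq_getElem hm, hbit]]
        rw [show cntb bit (l.drop (m + 1)) + 1
              = cntb bit (l.drop ((((m : Int) - 1) + 1).toNat)) from by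
          rw [htn', hdc]; simp [cntb, hbit]; ring]
        obtain ⟨hL, hP⟩ := ihk ((m : Int) - 1) (by omega) (by omega) (by omega) res hlen
          (fun j hj => hzero j (by omega))
        refine ⟨hL, fun j hj => ?_⟩
        rw [hP j hj]
        rcases Int.lt_trichotomy (m : Int) (j : Int) with hji | hji | hji
        · rw [if_pos (show (m : Int) - 1 < (j : Int) by omega), if_pos hji]
        · have hjm : j = m := by omega
          subst hjm
          rw [if_pos (show (j : Int) - 1 < (j : Int) by omega),
            if_neg (show ¬ (j : Int) < (j : Int) by omega), hgetD, if_pos hbit]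
          exact hzero j (by omega)
        · rw [if_neg (show ¬ (m : Int) - 1 < (j : Int) by omega),
            if_neg (show ¬ (m : Int) < (j : Int) by omega)]
      · have heq : cntb bit (l.drop (m + 1))
            = cntb bit (l.drop ((((m : Int) - 1) + 1).toNat)) := by
          rw [htn', hdc]; simp [cntb, hbit]
        rw [show pvHelperStep l bit (res, cntb bit (l.drop (m + 1))) (m : Int)
              = (res.set m (cntb bit (l.drop (m + 1))), cntb bit (l.drop (m + 1))) from by
            simp [pvHelperStep, List.getElem?_eq_getElem hm, hbit]]
        rw [heq]
        obtain ⟨hL, hP⟩ := ihk ((m : Int) - 1) (by omega) (by omega) (by omega)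
          (res.set m (cntb bit (l.drop ((((m : Int) - 1) + 1).toNat))))
          (by simpa using hlen)
          (fun j hj => by
            rw [getD_set_ne (show m ≠ j by omega)]; exact hzero j (by omega))
        refine ⟨hL, fun j hj => ?_⟩
        rw [hP j hj]
        rcases Int.lt_trichotomy (m : Int) (j : Int) with hji | hji | hji
        · rw [if_pos (show (m : Int) - 1 < (j : Int) by omega), if_pos hji,
            getD_set_ne (show m ≠ j by omega)]
        · have hjm : j = m := by omega
          subst hjm
          rw [if_pos (show (j : Int) - 1 < (j : Int) by omega),
            if_neg (show ¬ (j : Int) < (j : Int) by omega), hgetD, if_neg hbit,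
            getD_set_self (hlen ▸ hm)]
          rw [htn', hdc] at heq ⊢
          simp [cntb, hbit] at heq ⊢
        · rw [if_neg (show ¬ (m : Int) - 1 < (j : Int) by omega),
            if_neg (show ¬ (m : Int) < (j : Int) by omega)]

lemma pvHelper_left (s : String) (bit : Char) :
    (pvHelper s "LEFT" bit).length = s.toList.length ∧
    ∀ j : Nat, j < s.toList.length →
      (pvHelper s "LEFT" bit).getD j 0 =
        if s.toList.getD j ' ' = bit then 0 else cntb bit (s.toList.take j) := by
  obtain ⟨hL, hP⟩ := helperL bit s.toList s.toList.length 0 (by omega)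
    (List.replicate s.toList.length 0) (by simp)
    (fun j hj hj2 => by simp)
  refine ⟨hL, fun j hj => ?_⟩
  have := hP j hj
  rw [if_neg (by omega)] at this
  exact this

lemma pvHelper_right (s : String) (bit : Char) :
    (pvHelper s "RIGHT" bit).length = s.toList.length ∧
    ∀ j : Nat, j < s.toList.length →
      (pvHelper s "RIGHT" bit).getD j 0 =
        if s.toList.getD j ' ' = bit then 0 else cntb bit (s.toList.drop (j + 1)) := by
  obtain ⟨hL, hP⟩ := helperR bit s.toList ((s.toList.length : Int) - 1 + 1).toNat
    ((s.toList.length : Int) - 1) rfl (by omega) (by omega)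
    (List.replicate s.toList.length 0) (by simp)
    (fun j hj => by simp)
  have hcnt : cntb bit (s.toList.drop (((s.toList.length : Int) - 1) + 1).toNat) = 0 := by
    rw [show (((s.toList.length : Int) - 1) + 1).toNat = s.toList.length from by omega,
      List.drop_length]
    rfl
  rw [hcnt] at hL hP
  refine ⟨hL, fun j hj => ?_⟩
  have := hP j hj
  rw [if_neg (show ¬ (s.toList.length : Int) - 1 < (j : Int) by omega)] at this
  exact this

-- A's main fold equals sumSpec, for any arrays satisfying the helper characterisations
lemma mainFold (l : List Char) (lz rz lo ro : List Int)
    (hlz : ∀ j : Nat, j < l.length → lz.getD j 0 =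
      if l.getD j ' ' = '0' then 0 else cntb '0' (l.take j))
    (hrz : ∀ j : Nat, j < l.length → rz.getD j 0 =
      if l.getD j ' ' = '0' then 0 else cntb '0' (l.drop (j + 1)))
    (hlo : ∀ j : Nat, j < l.length → lo.getD j 0 =
      if l.getD j ' ' = '1' then 0 else cntb '1' (l.take j))
    (hro : ∀ j : Nat, j < l.length → ro.getD j 0 =
      if l.getD j ' ' = '1' then 0 else cntb '1' (l.drop (j + 1))) :
    ∀ (t : List Char) (i : Nat) (acc : Int), l.drop i = t →
      (PySem.List.enumerate t (i : Int)).foldl (pvMainStep lz rz lo ro) acc =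
        acc + sumSpec (cntb '0' (l.take i)) (cntb '1' (l.take i)) t := by
  intro t
  induction t with
  | nil => intro i acc _; simp [PySem.List.enumerate_nil, sumSpec]
  | cons c t' ih =>
      intro i acc hdrop
      have hi : i < l.length := by
        by_contra h
        rw [List.drop_eq_nil_of_le (by omega)] at hdrop
        exact List.cons_ne_nil c t' hdrop.symm
      have h2 := List.drop_eq_getElem_cons hi
      rw [hdrop] at h2
      injection h2 with hgi hdrop'
      have hgetD : l.getD i ' ' = c := by
        rw [List.getD_eq_getElem l ' ' hi, ← hgi]
      have htake : l.take (i + 1) = l.take i ++ [c] := by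
        rw [List.take_add_one, List.getElem?_eq_getElem hi, ← hgi]; rfl
      have hlzv : (PySem.List.pyGet? lz (i : Int)).getD 0 = lz.getD i 0 := by
        rw [PySem.List.pyGet?_natCast, List.getD_eq_getElem?_getD]
      have hrzv : (PySem.List.pyGet? rz (i : Int)).getD 0 = rz.getD i 0 := by
        rw [PySem.List.pyGet?_natCast, List.getD_eq_getElem?_getD]
      have hlov : (PySem.List.pyGet? lo (i : Int)).getD 0 = lo.getD i 0 := by
        rw [PySem.List.pyGet?_natCast, List.getD_eq_getElem?_getD]
      have hrov : (PySem.List.pyGet? ro (i : Int)).getD 0 = ro.getD i 0 := by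
        rw [PySem.List.pyGet?_natCast, List.getD_eq_getElem?_getD]
      rw [PySem.List.enumerate_cons, List.foldl_cons,
        show (i : Int) + 1 = ((i + 1 : Nat) : Int) from by push_cast; ring]
      by_cases h0 : c = '0'
      · subst h0
        have hstep : pvMainStep lz rz lo ro acc ((i : Int), '0')
            = acc + cntb '1' (l.take i) * cntb '1' (l.drop (i + 1)) := by
          simp only [pvMainStep, hlov, hrov, hlo i hi, hro i hi, hgetD]
          simp
        rw [hstep, ih (i + 1) _ (by rw [hdrop'])]
        rw [show cntb '0' (l.take (i + 1)) = cntb '0' (l.take i) + 1 from by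
            rw [htake, cntb_append]; simp [cntb]]
        rw [show cntb '1' (l.take (i + 1)) = cntb '1' (l.take i) from by
            rw [htake, cntb_append]; simp [cntb]]
        rw [show sumSpec (cntb '0' (l.take i)) (cntb '1' (l.take i)) ('0' :: t')
              = cntb '1' (l.take i) * cntb '1' t'
                + sumSpec (cntb '0' (l.take i) + 1) (cntb '1' (l.take i)) t' from by
            simp [sumSpec]]
        rw [← hdrop']
        ring
      · have hstep : pvMainStep lz rz lo ro acc ((i : Int), c)
            = acc + cntb '0' (l.take i) * cntb '0' (l.drop (i + 1)) := by
          simp only [pvMainStep, beq_iff_eq, hlzv, hrzv, hlz i hi, hrz i hi, hgetD]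
          simp [h0]
        rw [hstep, ih (i + 1) _ (by rw [hdrop'])]
        rw [show cntb '0' (l.take (i + 1)) = cntb '0' (l.take i) from by
            rw [htake, cntb_append]; simp [cntb, h0]]
        rw [show cntb '1' (l.take (i + 1))
              = cntb '1' (l.take i) + if c = '1' then 1 else 0 from by
            rw [htake, cntb_append]; simp [cntb]; try ring]
        rw [show sumSpec (cntb '0' (l.take i)) (cntb '1' (l.take i)) (c :: t')
              = cntb '0' (l.take i) * cntb '0' t'
                + sumSpec (cntb '0' (l.take i))
                    (cntb '1' (l.take i) + if c = '1' then 1 else 0) t' from by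
            simp [sumSpec, h0]]
        rw [← hdrop']
        ring

-- ===== VERDICT (by name: the statement is the Claim_ definition above) =====
theorem ways_to_select_buildings_spec : Claim_equal_ways_to_select_buildings := by
  intro s _
  unfold Spec_ways_to_select_buildings
  obtain ⟨-, hlz⟩ := pvHelper_left s '0'
  obtain ⟨-, hrz⟩ := pvHelper_right s '0'
  obtain ⟨-, hlo⟩ := pvHelper_left s '1'
  obtain ⟨-, hro⟩ := pvHelper_right s '1'
  have hmain := mainFold s.toList _ _ _ _ hlz hrz hlo hro s.toList 0 0 (by simp)
  have hA : ways_to_select_buildings s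
      = sumSpec 0 0 s.toList := by
    unfold ways_to_select_buildings
    simpa [cntb] using hmain
  have hB : ways_to_select_buildings_alt s = tr010 s.toList + tr101 s.toList := by
    unfold ways_to_select_buildings_alt
    simp [altFold]
  rw [hA, hB, sumSpec_eq]; ring
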